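-- pv_equiv track=rewrite | github.com/jusaviin/adventOfCode | 2020/day10/adapterCalculus.py | getDifferenceDistribution
-- ===== SOURCE A (Python) =====
-- def findMaxDifference(sortedList, groundJoltage, deviceJoltage):
--
--     maxDifference = 0
--
--     for index in range(0, len(sortedList)-1):
--         difference = sortedList[index+1] - sortedList[index]
--         if difference > maxDifference:
--             maxDifference = difference
--
--     if maxDifference < (deviceJoltage - sortedList[len(sortedList)-1]):
--         maxDifference = deviceJoltage - sortedList[len(sortedList)-1]
--     if maxDifference < (sortedList[0] - groundJoltage):
--         maxDifference = sortedList[0] - groundJoltage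
--
--     return maxDifference
--
-- def getDifferenceDistribution(outputJoltages, groundJoltage, deviceJoltage):
--
--     # Create a list for holding the distribution of differences
--     maxDifference = findMaxDifference(outputJoltages, groundJoltage, deviceJoltage)
--     differenceDistribution = [0 for i in range(0,maxDifference+1)]
--
--     # Fill the distribution of joltages
--     joltageDifference = outputJoltages[0] - groundJoltage
--     differenceDistribution[joltageDifference] = differenceDistribution[joltageDifference]+1
--
--     for index in range(0, len(outputJoltages)-1):
--         joltageDifference = outputJoltages[index+1] - outputJoltages[index]
--         differenceDistribution[joltageDifference] = differenceDistribution[joltageDifference]+1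
--
--     joltageDifference = deviceJoltage - outputJoltages[len(outputJoltages)-1]
--     differenceDistribution[joltageDifference] = differenceDistribution[joltageDifference]+1
--
--     return differenceDistribution
-- ===== SOURCE B (Python) =====
-- def getDifferenceDistribution(outputJoltages, groundJoltage, deviceJoltage):
--     # Sort the joltage gaps once, then tabulate them run by run (run-length
--     # encoding of the sorted gap list; the table size falls out of the sort).
--     gaps = sorted(hi - lo for lo, hi in zip([groundJoltage] + outputJoltages,
--                                             outputJoltages + [deviceJoltage]))
--     distribution = [0] * (max(0, gaps[-1]) + 1)
--     while gaps:
--         run = 1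
--         while run < len(gaps) and gaps[run] == gaps[0]:
--             run += 1
--         distribution[gaps[0]] += run
--         gaps = gaps[run:]
--     return distribution
-- ===== Notes on version B (the rewrite author's own statement) =====
-- stated objective: alternative
-- what changed: B sorts the joltage-gap list once and tabulates it run by run (run-length encoding of the sorted gaps, with the table size read off the sorted list's last element), instead of A's separate running-max helper scan followed by per-gap scatter increments into the table.
import Mathlib
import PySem

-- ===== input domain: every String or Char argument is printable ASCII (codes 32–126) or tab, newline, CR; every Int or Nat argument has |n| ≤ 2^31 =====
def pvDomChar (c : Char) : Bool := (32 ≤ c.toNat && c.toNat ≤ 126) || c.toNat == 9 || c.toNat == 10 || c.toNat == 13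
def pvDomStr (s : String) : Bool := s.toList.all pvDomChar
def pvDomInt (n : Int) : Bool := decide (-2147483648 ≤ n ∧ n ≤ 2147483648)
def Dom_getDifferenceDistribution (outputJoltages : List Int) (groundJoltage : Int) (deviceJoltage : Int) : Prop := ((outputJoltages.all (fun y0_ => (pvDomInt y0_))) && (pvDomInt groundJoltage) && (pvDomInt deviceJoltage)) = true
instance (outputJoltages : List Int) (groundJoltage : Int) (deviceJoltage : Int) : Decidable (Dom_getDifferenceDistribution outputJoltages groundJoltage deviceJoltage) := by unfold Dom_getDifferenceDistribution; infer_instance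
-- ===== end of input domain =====

-- B sorts the joltage gaps once and tabulates the sorted list run by run (run-length encoding),
-- replacing A's separate running-max helper scan plus per-gap scatter increments
-- (objective: alternative; equivalence is about the return value).
-- ===== PORT A =====
def findMaxDifference (sortedList : List Int) (groundJoltage : Int) (deviceJoltage : Int) : Int :=
  let maxDifference : Int := 0
  let maxDifference := (PySem.List.pyRange 0 ((sortedList.length : Int) - 1) 1).foldl
    (fun maxDifference index =>
      let difference := PySem.List.pyGetD sortedList (index + 1) 0 - PySem.List.pyGetD sortedList index 0
      if difference > maxDifference then difference else maxDifference) maxDifference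
  let maxDifference := if maxDifference < deviceJoltage - PySem.List.pyGetD sortedList ((sortedList.length : Int) - 1) 0
    then deviceJoltage - PySem.List.pyGetD sortedList ((sortedList.length : Int) - 1) 0 else maxDifference
  let maxDifference := if maxDifference < PySem.List.pyGetD sortedList 0 0 - groundJoltage
    then PySem.List.pyGetD sortedList 0 0 - groundJoltage else maxDifference
  maxDifference

def getDifferenceDistribution (outputJoltages : List Int) (groundJoltage : Int) (deviceJoltage : Int) : List Int :=
  let maxDifference := findMaxDifference outputJoltages groundJoltage deviceJoltage
  let differenceDistribution := (PySem.List.pyRange 0 (maxDifference + 1) 1).map (fun _ => (0 : Int))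
  let joltageDifference := PySem.List.pyGetD outputJoltages 0 0 - groundJoltage
  let differenceDistribution := PySem.List.pySetD differenceDistribution joltageDifference
    (PySem.List.pyGetD differenceDistribution joltageDifference 0 + 1)
  let differenceDistribution := (PySem.List.pyRange 0 ((outputJoltages.length : Int) - 1) 1).foldl
    (fun differenceDistribution index =>
      let joltageDifference := PySem.List.pyGetD outputJoltages (index + 1) 0 - PySem.List.pyGetD outputJoltages index 0
      PySem.List.pySetD differenceDistribution joltageDifference
        (PySem.List.pyGetD differenceDistribution joltageDifference 0 + 1)) differenceDistribution
  let joltageDifference := deviceJoltage - PySem.List.pyGetD outputJoltages ((outputJoltages.length : Int) - 1) 0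
  PySem.List.pySetD differenceDistribution joltageDifference
    (PySem.List.pyGetD differenceDistribution joltageDifference 0 + 1)

-- ===== PORT B =====
-- Source B's outer while loop: peel one run of equal gaps off the (sorted) gap list, add its length.
def tallyRuns (distribution : List Int) (gaps : List Int) : List Int :=
  match gaps with
  | [] => distribution
  | g0 :: rest =>
    -- inner while loop: run = 1 + number of further leading gaps equal to gaps[0]
    let run : Nat := 1 + (rest.takeWhile (fun x => x == g0)).length
    -- distribution[gaps[0]] += run
    let distribution := PySem.List.pySetD distribution g0
      (PySem.List.pyGetD distribution g0 0 + (run : Int))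
    tallyRuns distribution ((g0 :: rest).drop run)   -- gaps = gaps[run:]
termination_by gaps.length
decreasing_by simp only [List.length_drop, List.length_cons]; omega

def getDifferenceDistribution_alt (outputJoltages : List Int) (groundJoltage : Int) (deviceJoltage : Int) : List Int :=
  let gaps := PySem.List.sorted
    (((groundJoltage :: outputJoltages).zip (outputJoltages ++ [deviceJoltage])).map (fun p => p.2 - p.1))
    (fun x => x) false
  let distribution := List.replicate ((max 0 (PySem.List.pyGetD gaps (-1) 0) + 1).toNat) (0 : Int)
  tallyRuns distribution gaps

-- ===== PRECONDITION & SPEC =====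
-- the ordered list of joltage gaps (used only to state Pre_)
def pvGaps (outputJoltages : List Int) (groundJoltage : Int) (deviceJoltage : Int) : List Int :=
  List.zipWith (fun hi lo => hi - lo) (outputJoltages ++ [deviceJoltage]) (groundJoltage :: outputJoltages)

-- Pre_ is exactly the set of inputs on which the Python A returns: outputJoltages nonempty (else
-- outputJoltages[0] raises IndexError) and every gap within Python's negative-index reach of the
-- zero table of length max(0, gaps) + 1 (else the increment raises IndexError).
def Pre_getDifferenceDistribution (outputJoltages : List Int) (groundJoltage : Int) (deviceJoltage : Int) : Prop :=
  outputJoltages ≠ [] ∧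
  ∀ d ∈ pvGaps outputJoltages groundJoltage deviceJoltage,
    -((pvGaps outputJoltages groundJoltage deviceJoltage).foldl max 0 + 1) ≤ d

instance (outputJoltages : List Int) (groundJoltage : Int) (deviceJoltage : Int) : Decidable (Pre_getDifferenceDistribution outputJoltages groundJoltage deviceJoltage) := by unfold Pre_getDifferenceDistribution; infer_instance

def pvWitness_getDifferenceDistribution : List Int × Int × Int := ([1, 4, 5], 0, 8)

def Spec_getDifferenceDistribution (outputJoltages : List Int) (groundJoltage : Int) (deviceJoltage : Int) (out : List Int) : Prop := out = getDifferenceDistribution_alt outputJoltages groundJoltage deviceJoltage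
instance (outputJoltages : List Int) (groundJoltage : Int) (deviceJoltage : Int) (out : List Int) : Decidable (Spec_getDifferenceDistribution outputJoltages groundJoltage deviceJoltage out) := by unfold Spec_getDifferenceDistribution; infer_instance

-- ===== CLAIM (what is proved, stated in full; the proofs are below) =====
def Claim_equal_getDifferenceDistribution : Prop := ∀ (outputJoltages : List Int) (groundJoltage : Int) (deviceJoltage : Int), Dom_getDifferenceDistribution outputJoltages groundJoltage deviceJoltage → Pre_getDifferenceDistribution outputJoltages groundJoltage deviceJoltage → Spec_getDifferenceDistribution outputJoltages groundJoltage deviceJoltage (getDifferenceDistribution outputJoltages groundJoltage deviceJoltage)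

-- ===== LEMMAS AND PROOFS =====

-- the scatter step shared by the analyses of both programs: distribution[d] += 1
def pvInc (dist : List Int) (d : Int) : List Int :=
  PySem.List.pySetD dist d (PySem.List.pyGetD dist d 0 + 1)

lemma pyIdx_lt {n : Nat} {i : Int} {k : Nat} (h : PySem.List.pyIdx? n i = some k) : k < n := by
  unfold PySem.List.pyIdx? at h
  split_ifs at h with h1 h2 h3 <;> injection h with hk <;> omega

-- two increments at the same index merge into one addition
lemma pySetD_merge (dist : List Int) (d a b : Int) :
    PySem.List.pySetD (PySem.List.pySetD dist d (PySem.List.pyGetD dist d 0 + a)) d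
        (PySem.List.pyGetD (PySem.List.pySetD dist d (PySem.List.pyGetD dist d 0 + a)) d 0 + b)
      = PySem.List.pySetD dist d (PySem.List.pyGetD dist d 0 + (a + b)) := by
  unfold PySem.List.pySetD PySem.List.pySet? PySem.List.pyGetD PySem.List.pyGet?
  cases h : PySem.List.pyIdx? dist.length d with
  | none => simp [h]
  | some k =>
    have hk := pyIdx_lt h
    simp only [h, Option.map_some, Option.getD_some, List.length_set, Option.bind_some,
      List.getElem?_set_self hk, List.set_set]
    ring_nf

-- increments commute
lemma pvInc_comm (dist : List Int) (d1 d2 : Int) :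
    pvInc (pvInc dist d1) d2 = pvInc (pvInc dist d2) d1 := by
  unfold pvInc PySem.List.pySetD PySem.List.pySet? PySem.List.pyGetD PySem.List.pyGet?
  cases h1 : PySem.List.pyIdx? dist.length d1 with
  | none =>
    cases h2 : PySem.List.pyIdx? dist.length d2 with
    | none => simp [h1, h2]
    | some k2 => simp [h1, h2, pyIdx_lt h2]
  | some k1 =>
    cases h2 : PySem.List.pyIdx? dist.length d2 with
    | none => simp [h1, h2, pyIdx_lt h1]
    | some k2 =>
      have hk1 := pyIdx_lt h1
      have hk2 := pyIdx_lt h2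
      by_cases hkk : k1 = k2
      · subst hkk
        simp [h1, h2, List.getElem?_set_self hk1, List.set_set]
      · simp only [h1, h2, Option.map_some, Option.getD_some, List.length_set,
          Option.bind_some, List.getElem?_set_ne (Ne.symm hkk), List.getElem?_set_ne hkk]
        exact List.set_comm _ _ hkk

-- a run of k+1 equal increments is one addition of k+1
lemma foldl_pvInc_replicate (k : Nat) (dist : List Int) (d : Int) :
    (List.replicate (k + 1) d).foldl pvInc dist
      = PySem.List.pySetD dist d (PySem.List.pyGetD dist d 0 + (k + 1 : Int)) := by
  induction k generalizing dist with
  | zero => simp [pvInc]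
  | succ m ih =>
    rw [List.replicate_succ, List.foldl_cons]
    rw [show pvInc dist d = PySem.List.pySetD dist d (PySem.List.pyGetD dist d 0 + 1) from rfl]
    rw [ih]
    rw [pySetD_merge dist d 1 (m + 1 : Int)]
    norm_num
    ring_nf

-- Source B's run-length tabulation of a list is the element-by-element scatter over it
lemma tally_eq (gaps : List Int) (dist : List Int) :
    tallyRuns dist gaps = gaps.foldl pvInc dist := by
  match gaps with
  | [] => rw [tallyRuns]; rfl
  | g0 :: rest =>
    rw [tallyRuns]
    have htw : rest.takeWhile (fun x => x == g0) = List.replicate (rest.takeWhile (fun x => x == g0)).length g0 := by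
      rw [List.eq_replicate_iff]
      exact ⟨rfl, fun b hb => by simpa using List.mem_takeWhile_imp hb⟩
    have hsplit : rest = rest.takeWhile (fun x => x == g0) ++ rest.drop (rest.takeWhile (fun x => x == g0)).length := by
      conv_lhs => rw [← List.take_append_drop (rest.takeWhile (fun x => x == g0)).length rest]
      rw [← List.prefix_iff_eq_take.mp (List.takeWhile_prefix _)]
    conv_rhs => rw [hsplit]
    rw [show (1 : Nat) + (rest.takeWhile (fun x => x == g0)).length = (rest.takeWhile (fun x => x == g0)).length + 1 from by omega,
      List.drop_succ_cons]
    rw [tally_eq (rest.drop (rest.takeWhile (fun x => x == g0)).length) _]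
    rw [show g0 :: (rest.takeWhile (fun x => x == g0) ++ rest.drop (rest.takeWhile (fun x => x == g0)).length)
        = (g0 :: rest.takeWhile (fun x => x == g0)) ++ rest.drop (rest.takeWhile (fun x => x == g0)).length from rfl]
    rw [List.foldl_append]
    congr 1
    conv_rhs => rw [htw, ← List.replicate_succ]
    rw [foldl_pvInc_replicate]
    push_cast
    ring_nf
termination_by gaps.length
decreasing_by
  have := (List.takeWhile_prefix (l := rest) (fun x => x == g0)).length_le
  simp only [List.length_drop, List.length_cons]; omega

-- B's zipped gap list is pvGaps
lemma gaps_eq_zip_map (xs : List Int) (g dev : Int) :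
    ((g :: xs).zip (xs ++ [dev])).map (fun p => p.2 - p.1) = pvGaps xs g dev := by
  induction xs generalizing g with
  | nil => simp [pvGaps]
  | cons a t ih => simpa [pvGaps] using ih a

lemma pvGaps_ne_nil (xs : List Int) (g dev : Int) : pvGaps xs g dev ≠ [] := by
  cases xs <;> simp [pvGaps]

-- decomposition of the gap list of a nonempty adapter list: first gap, consecutive gaps, device gap
lemma gaps_cons (xs : List Int) (g dev : Int) (h : xs ≠ []) :
    pvGaps xs g dev =
      (xs.getD 0 0 - g) :: (List.zipWith (fun hi lo => hi - lo) xs.tail xs ++ [dev - xs.getD (xs.length - 1) 0]) := by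
  obtain ⟨a, t, rfl⟩ := List.exists_cons_of_ne_nil h
  simp only [pvGaps, List.cons_append, List.zipWith_cons_cons, List.getD_cons_zero, List.tail_cons]
  congr 1
  induction t generalizing a with
  | nil => simp
  | cons b t ih => simpa using ih b

-- a fold over range(0, len-1) reading xs[i+1]-xs[i] is a fold over the consecutive-gap list
lemma foldl_range_consec_nat {β : Type} (f : β → Int → β) (xs : List Int) (b : β) :
    (List.range (xs.length - 1)).foldl
        (fun s k => f s (xs.getD (k + 1) 0 - xs.getD k 0)) b
      = (List.zipWith (fun hi lo => hi - lo) xs.tail xs).foldl f b := by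
  induction xs generalizing b with
  | nil => simp
  | cons x t ih =>
    cases t with
    | nil => simp
    | cons y t' =>
      simp only [List.length_cons, Nat.add_sub_cancel, List.range_succ_eq_map,
        List.foldl_cons, List.foldl_map, List.tail_cons, List.zipWith_cons_cons]
      simpa using ih (b := f b (y - x))

lemma foldl_range_consec {β : Type} (f : β → Int → β) (xs : List Int) (b : β) :
    (PySem.List.pyRange 0 ((xs.length : Int) - 1) 1).foldl
        (fun s i => f s (PySem.List.pyGetD xs (i + 1) 0 - PySem.List.pyGetD xs i 0)) b
      = (List.zipWith (fun hi lo => hi - lo) xs.tail xs).foldl f b := by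
  rw [PySem.List.pyRange_one, List.foldl_map, ← foldl_range_consec_nat f xs b]
  have hlen : ((xs.length : Int) - 1 - 0).toNat = xs.length - 1 := by omega
  rw [hlen]
  apply PySem.List.foldl_congr_mem
  intro s k hk
  have hc : ((k : Int) + 1) = ((k + 1 : Nat) : Int) := by push_cast; ring
  rw [show (0:Int) + (k:Int) = (k:Int) by ring, hc, PySem.List.pyGetD_natCast]
  simp [List.getD]

lemma foldl_max_pull (l : List Int) (a b : Int) : l.foldl max (max a b) = max a (l.foldl max b) := by
  induction l generalizing b with
  | nil => rfl
  | cons c t ih => simpa [max_assoc] using ih (max b c)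

-- A's helper computes the max (clamped at 0) of the whole gap list
lemma maxs_eq_foldl (xs : List Int) (g dev : Int) (h : xs ≠ []) :
    findMaxDifference xs g dev = (pvGaps xs g dev).foldl max 0 := by
  have hlen : 0 < xs.length := List.length_pos_of_ne_nil h
  unfold findMaxDifference
  dsimp only
  rw [foldl_range_consec (fun m d => if d > m then d else m) xs 0]
  rw [PySem.List.foldl_congr_mem (List.zipWith (fun hi lo => hi - lo) xs.tail xs)
    (fun m d => if d > m then d else m) (fun m d => max m d) 0
    (by intro acc x _; dsimp only; split_ifs <;> omega)]
  rw [gaps_cons xs g dev h]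
  set C := List.zipWith (fun hi lo => hi - lo) xs.tail xs with hC
  rw [List.foldl_cons, List.foldl_append]
  simp only [List.foldl_cons, List.foldl_nil]
  have hidx : ((xs.length : Int) - 1) = ((xs.length - 1 : Nat) : Int) := by omega
  rw [hidx, PySem.List.pyGetD_natCast, PySem.List.pyGetD_zero]
  have h1 : C.foldl max (max 0 (xs.getD 0 0 - g)) = max (xs.getD 0 0 - g) (C.foldl max 0) := by
    rw [max_comm]; exact foldl_max_pull C _ 0
  have hu : (0:Int) ≤ C.foldl max 0 := (PySem.List.le_foldl_max C 0).1
  rw [h1]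
  set u := C.foldl max 0
  set fst := xs.getD 0 0 - g
  set lst := dev - xs.getD (xs.length - 1) 0
  split_ifs <;> omega

-- the last element of the (id-)sorted list, clamped at 0, is the fold-max of the original
lemma foldl_max_getLast (s : List Int) (h : s ≠ []) (hp : s.Pairwise (· ≤ ·)) (a : Int) :
    s.foldl max a = max a (s.getLast h) := by
  induction s generalizing a with
  | nil => exact absurd rfl h
  | cons x t ih =>
    cases t with
    | nil => simp [List.getLast]
    | cons y t' =>
      rw [List.foldl_cons, ih (by simp) (List.Pairwise.of_cons hp) (max a x),
        List.getLast_cons_cons]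
      have hx : x ≤ (y :: t').getLast (by simp) :=
        List.rel_of_pairwise_cons hp (List.getLast_mem _)
      omega

lemma sorted_last_max (l : List Int) (h : l ≠ []) :
    max 0 (PySem.List.pyGetD (PySem.List.sorted l (fun x => x) false) (-1) 0) = l.foldl max 0 := by
  have hs : PySem.List.sorted l (fun x => x) false ≠ [] := by
    rw [Ne, PySem.List.sorted_eq_nil_iff]; exact h
  rw [PySem.List.pyGetD_neg_one _ _ hs]
  rw [← (PySem.List.sorted_perm l (fun x => x) false).foldl_eq'
    (fun x _ y _ z => by rw [max_right_comm]) 0]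
  rw [foldl_max_getLast _ hs (PySem.List.sorted_pairwise l (fun x => x)) 0]

-- the zero table: A's comprehension over range(maxDifference+1) is a replicate
lemma zeros_init (m : Int) :
    (PySem.List.pyRange 0 (m + 1) 1).map (fun _ => (0 : Int)) = List.replicate ((m + 1).toNat) (0 : Int) := by
  simp [PySem.List.pyRange_one, List.map_map, Function.comp_def, List.map_const']

theorem getDifferenceDistribution_eq (xs : List Int) (g dev : Int) (h : xs ≠ []) :
    getDifferenceDistribution xs g dev = getDifferenceDistribution_alt xs g dev := by
  have hlen : 0 < xs.length := List.length_pos_of_ne_nil h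
  unfold getDifferenceDistribution getDifferenceDistribution_alt
  dsimp only
  rw [maxs_eq_foldl xs g dev h, zeros_init]
  rw [foldl_range_consec (fun dist d => PySem.List.pySetD dist d (PySem.List.pyGetD dist d 0 + 1)) xs]
  have hidx : ((xs.length : Int) - 1) = ((xs.length - 1 : Nat) : Int) := by omega
  rw [hidx, PySem.List.pyGetD_natCast, PySem.List.pyGetD_zero]
  rw [gaps_eq_zip_map xs g dev, tally_eq, sorted_last_max _ (pvGaps_ne_nil xs g dev)]
  rw [(PySem.List.sorted_perm (pvGaps xs g dev) (fun x => x) false).foldl_eq'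
    (fun x _ y _ z => pvInc_comm z x y) _]
  rw [gaps_cons xs g dev h]
  simp only [List.foldl_cons, List.foldl_append, List.foldl_nil]
  rfl

-- ===== VERDICT (by name: the statement is the Claim_ definition above) =====
theorem getDifferenceDistribution_spec : Claim_equal_getDifferenceDistribution := by
  intro xs g dev _ hpre
  exact getDifferenceDistribution_eq xs g dev hpre.1
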